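/- GENERATED by mk_final_copies.py from the proof of the farm's unit `residue_decode` (farm:residue_decode.1: Lemmas.lean) as the
   re-elaboration sweep compiled it — do not edit. -/
import Asan.CheckWalk
import Vorbis.Spec.Units.residue_decode

open X86 X86.User Asan Vorbis Vorbis.Spec

namespace Vorbis.Spec.residue_decode

/-- `cdq ; idiv` of a non-negative 32-bit dividend by a positive 32-bit divisor (0x10ea95, 0x10ea96; C 2114 `n / book->dimensions`):
no `#DE`, the quotient and the remainder are those of the natural numbers. -/
theorem idiv_nonneg (x d : BitVec 32) (hx : x.toNat < 2 ^ 31) (hd1 : 1 ≤ d.toNat) (hd : d.toNat < 2 ^ 31) :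
    Alu.div true (if x.msb = true then BitVec.allOnes 32 else 0) x d =
      some (BitVec.ofNat 32 (x.toNat / d.toNat), BitVec.ofNat 32 (x.toNat % d.toNat)) := by
  have hxm : x.msb = false := by
    rw [BitVec.msb_eq_false_iff_two_mul_lt]
    omega
  have hdm : d.msb = false := by
    rw [BitVec.msb_eq_false_iff_two_mul_lt]
    omega
  have hd0 : (d == 0) = false := by
    rw [beq_eq_false_iff_ne]
    intro h
    rw [h] at hd1
    exact absurd hd1 (by decide)
  -- the dividend and the divisor at 64 bits
  have hD : ((0 : BitVec 32) ++ x).toNat = x.toNat := by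
    rw [BitVec.toNat_append]
    show 0 <<< 32 ||| x.toNat = x.toNat
    rw [Nat.zero_shiftLeft, Nat.zero_or]
  have hDm : ((0 : BitVec 32) ++ x).msb = false := by
    rw [BitVec.msb_eq_false_iff_two_mul_lt, hD]
    omega
  have hE : (BitVec.signExtend (32 + 32) d).toNat = d.toNat := by
    rw [BitVec.signExtend_eq_setWidth_of_msb_false hdm, BitVec.toNat_setWidth]
    omega
  have hEm : (BitVec.signExtend (32 + 32) d).msb = false := by
    rw [BitVec.msb_eq_false_iff_two_mul_lt, hE]
    omega
  have hq : (((0 : BitVec 32) ++ x).sdiv (BitVec.signExtend (32 + 32) d)).toNat = x.toNat / d.toNat := by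
    rw [BitVec.sdiv_eq, hDm, hEm]
    show (((0 : BitVec 32) ++ x) / (BitVec.signExtend (32 + 32) d)).toNat = _
    rw [BitVec.toNat_udiv, hD, hE]
  have hr : (((0 : BitVec 32) ++ x).srem (BitVec.signExtend (32 + 32) d)).toNat = x.toNat % d.toNat := by
    rw [BitVec.srem_eq, hDm, hEm]
    show (((0 : BitVec 32) ++ x) % (BitVec.signExtend (32 + 32) d)).toNat = _
    rw [BitVec.toNat_umod, hD, hE]
  have hqlt : x.toNat / d.toNat < 2 ^ 31 := Nat.lt_of_le_of_lt (Nat.div_le_self _ _) hx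
  have hrlt : x.toNat % d.toNat < 2 ^ 31 := Nat.lt_trans (Nat.mod_lt _ (by omega)) hd
  unfold Alu.div
  simp only [hd0, hxm, Bool.false_eq_true, if_false, if_true]
  generalize ((0 : BitVec 32) ++ x).sdiv (BitVec.signExtend (32 + 32) d) = q at hq
  generalize ((0 : BitVec 32) ++ x).srem (BitVec.signExtend (32 + 32) d) = r at hr
  have e1 : BitVec.setWidth 32 q = BitVec.ofNat 32 (x.toNat / d.toNat) := by
    apply BitVec.eq_of_toNat_eq
    rw [BitVec.toNat_setWidth, hq, BitVec.toNat_ofNat]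
  have e2 : BitVec.setWidth 32 r = BitVec.ofNat 32 (x.toNat % d.toNat) := by
    apply BitVec.eq_of_toNat_eq
    rw [BitVec.toNat_setWidth, hr, BitVec.toNat_ofNat]
  have e3 : BitVec.signExtend (32 + 32) (BitVec.setWidth 32 q) = q := by
    have hm : (BitVec.setWidth 32 q).msb = false := by
      rw [BitVec.msb_eq_false_iff_two_mul_lt, BitVec.toNat_setWidth, hq]
      omega
    rw [BitVec.signExtend_eq_setWidth_of_msb_false hm]
    apply BitVec.eq_of_toNat_eq
    rw [BitVec.toNat_setWidth, BitVec.toNat_setWidth, hq]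
    omega
  rw [e3, e1, e2]
  simp only [bne_self_eq_false, Bool.false_eq_true, if_false]

/-- A 32-bit register write of a number: the register holds the number modulo `2^32`. -/
theorem ofBV_ofNat32 (n : Nat) : Word.ofBV (BitVec.ofNat 32 n) = UInt64.ofNat (n % 2 ^ 32) := by
  rw [ofBV_eq_addr _ (by decide), BitVec.toNat_ofNat]
  rfl

/-- A 32-bit register copy (`mov r32, r32`): the register holds the low half as a number. -/
theorem ofBV_part32 (w : Word) : Word.ofBV (Word.part Width.w32 w) = UInt64.ofNat (w.toNat % 2 ^ 32) := by
  rw [ofBV_eq_addr _ (by decide), Asan.part32_toNat]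
  rfl

/-- A 32-bit register write of a number below `2^32`: the register holds the number. -/
theorem ofBV_ofNat32_lt (n : Nat) (h : n < 2 ^ 32) : Word.ofBV (BitVec.ofNat 32 n) = UInt64.ofNat n := by
  rw [ofBV_ofNat32, Nat.mod_eq_of_lt h]

/-- **The precondition of a callee of residue_decode, at a state `s` inside one of its loops.** `u` is residue_decode's entry
state; the memory of `s` differs from it only in residue_decode's own stack, the reader's windows of `*f` and the window of
floats (`hs`): none of them meets the struct at `book` or its `sorted_values` block, so `BookPre` holds again (`BookPre.carry`),
the window of floats is still a `FloatWindow`, and `book->dimensions` reads the same. -/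
theorem carry_book {others : List Obj} {frames : List (Nat × FrameLayout)} {Blk : Block → Prop} {len : Nat} {u s : State}
    {W n : Nat} (h : BookPre others frames Blk len u)
    (hwin : FloatWindow others frames u.mem (u.reg .rdi).toNat (u.reg .rsi).toNat W (4 * n))
    (hroom : 0x700000 + 592 ≤ (u.reg .rsp).toNat)
    (hsh : ShadowPre others frames s) (hrdi : s.reg .rdi = u.reg .rdi) (hrsi : s.reg .rsi = u.reg .rsi)
    (hb : Bits Blk len s.mem (u.reg .rdi).toNat)
    (hs : Mem.SameExcept [⟨(u.reg .rsp).toNat - 592, (u.reg .rsp).toNat⟩,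
        ⟨(u.reg .rdi).toNat + 48, (u.reg .rdi).toNat + 56⟩, ⟨(u.reg .rdi).toNat + 84, (u.reg .rdi).toNat + 96⟩,
        ⟨(u.reg .rdi).toNat + 136, (u.reg .rdi).toNat + 144⟩, ⟨(u.reg .rdi).toNat + 1484, (u.reg .rdi).toNat + 1749⟩,
        ⟨(u.reg .rdi).toNat + 1752, (u.reg .rdi).toNat + 1784⟩, ⟨W, W + 4 * n⟩] u.mem s.mem) :
    BookPre others frames Blk len s ∧
      FloatWindow others frames s.mem (u.reg .rdi).toNat (u.reg .rsi).toNat W (4 * n) ∧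
      Codebook.dimensions s.mem (u.reg .rsi).toNat = Codebook.dimensions u.mem (u.reg .rsi).toNat := by
  have hsh0 := h.reader.shadow
  have hsp := hsh0.rsp
  obtain ⟨B, hB, hBin⟩ := h.book
  have hBin' := hBin
  simp only [vblock, Vorbis.Off.sizeof.Codebook] at hBin'
  have hBw := blk_where h.reader.env.live hsh0.inv hsh0.offText (by omega) hB (by omega)
  have hfb := h.apart.book
  have hwb := hwin.offBook
  simp only [vblock, Vorbis.Off.sizeof.Codebook, Vorbis.Off.sizeof.stb_vorbis] at hfb hwb
  -- no window meets the struct at `book`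
  have hd1 : ∀ w, w ∈ [(⟨(u.reg .rsp).toNat - 592, (u.reg .rsp).toNat⟩ : Span),
        ⟨(u.reg .rdi).toNat + 48, (u.reg .rdi).toNat + 56⟩, ⟨(u.reg .rdi).toNat + 84, (u.reg .rdi).toNat + 96⟩,
        ⟨(u.reg .rdi).toNat + 136, (u.reg .rdi).toNat + 144⟩, ⟨(u.reg .rdi).toNat + 1484, (u.reg .rdi).toNat + 1749⟩,
        ⟨(u.reg .rdi).toNat + 1752, (u.reg .rdi).toNat + 1784⟩, ⟨W, W + 4 * n⟩] →
      (u.reg .rsi).toNat + Off.sizeof.Codebook ≤ w.lo ∨ w.hi ≤ (u.reg .rsi).toNat := by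
    intro w hw
    simp only [List.mem_cons, List.not_mem_nil, or_false] at hw
    simp only [Vorbis.Off.sizeof.Codebook]
    rcases hw with rfl | rfl | rfl | rfl | rfl | rfl | rfl
    all_goals
      simp only []
      omega
  -- … nor its `sorted_values` block
  have hd2 : 1 ≤ Codebook.sorted_entries u.mem (u.reg .rsi).toNat →
      ∀ w, w ∈ [(⟨(u.reg .rsp).toNat - 592, (u.reg .rsp).toNat⟩ : Span),
        ⟨(u.reg .rdi).toNat + 48, (u.reg .rdi).toNat + 56⟩, ⟨(u.reg .rdi).toNat + 84, (u.reg .rdi).toNat + 96⟩,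
        ⟨(u.reg .rdi).toNat + 136, (u.reg .rdi).toNat + 144⟩, ⟨(u.reg .rdi).toNat + 1484, (u.reg .rdi).toNat + 1749⟩,
        ⟨(u.reg .rdi).toNat + 1752, (u.reg .rdi).toNat + 1784⟩, ⟨W, W + 4 * n⟩] →
      (Codebook.svBlock u.mem (u.reg .rsi).toNat).base + (Codebook.svBlock u.mem (u.reg .rsi).toNat).size ≤ w.lo ∨
        w.hi ≤ (Codebook.svBlock u.mem (u.reg .rsi).toNat).base := by
    intro hse w hw
    have hv := h.cb.K4.sv hse
    have hfv := h.apart.sv hse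
    have hwv := hwin.offSv hse
    have hvw := blk_where h.reader.env.live hsh0.inv hsh0.offText (by omega) hv (by simp only []; omega)
    simp only [vblock, Vorbis.Off.sizeof.stb_vorbis] at hfv hwv hvw
    simp only [List.mem_cons, List.not_mem_nil, or_false] at hw
    rcases hw with rfl | rfl | rfl | rfl | rfl | rfl | rfl
    all_goals
      simp only []
      omega
  have hkept : (Codebook.block (u.reg .rsi).toNat).Kept u.mem s.mem :=
    Block.Kept.of_sameExcept hs hd1 (Codebook.block_no_wrap h.ok hB hBin)
  have sf := Codebook.SameFields.of_kept hkept
  refine ⟨h.carry hsh hrdi hrsi hb hs hd1 hd2, ⟨hwin.site, hwin.offObj, hwin.offBook, ?_⟩, sf.dimensions⟩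
  intro hse
  rw [sf.sorted_entries] at hse
  have hd := hwin.offSv hse
  unfold Codebook.svBlock at hd ⊢
  rw [sf.sorted_values, sf.sorted_entries]
  exact hd

/-- The low half of a register that holds a small number, as a number. -/
theorem part32_ofNat_toNat (a : Nat) (ha : a < 2 ^ 31) : (Word.part Width.w32 (UInt64.ofNat a)).toNat = a := by
  rw [Asan.part32_toNat, UInt64.toNat_ofNat']
  omega

/-- The low half of a register that holds a small number, as a signed number (the operands of `cmp ebx, r15d`). -/
theorem part32_ofNat_toInt (a : Nat) (ha : a < 2 ^ 31) : (Word.part Width.w32 (UInt64.ofNat a)).toInt = (a : Int) := by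
  rw [Vorbis.Spec.toInt_of_lt _ (by rw [part32_ofNat_toNat a ha]; exact ha), part32_ofNat_toNat a ha]

/-- `movsxd r64, r32` of a register that holds a small number: the number. -/
theorem sext_ofNat (a : Nat) (ha : a < 2 ^ 31) :
    Word.ofBV (BitVec.signExtend 64 (Word.part Width.w32 (UInt64.ofNat a))) = UInt64.ofNat a := by
  apply UInt64.toNat_inj.mp
  rw [Vorbis.Spec.toNat_sext32 _ (by rw [part32_ofNat_toNat a ha]; exact ha), part32_ofNat_toNat a ha,
    UInt64.toNat_ofNat']
  omega

/-- `movsxd rax, ebp ; movsxd rdx, ebx ; add rax, rdx ; lea rdx, [r14 + rax*4]` (0x10eaac – 0x10eab7, C 2116):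
`target + offset + k`, as a number. -/
theorem lea2_toNat (p : Word) (a b : Nat) (ha : a < 2 ^ 31) (hb : b < 2 ^ 31) (h : p.toNat + 4 * (a + b) < 2 ^ 64) :
    (p + (Word.ofBV (BitVec.signExtend 64 (Word.part Width.w32 (UInt64.ofNat a))) +
        Word.ofBV (BitVec.signExtend 64 (Word.part Width.w32 (UInt64.ofNat b)))) * 4).toNat = p.toNat + 4 * (a + b) := by
  rw [sext_ofNat a ha, sext_ofNat b hb, UInt64.toNat_add, UInt64.toNat_mul, UInt64.toNat_add, UInt64.toNat_ofNat',
    UInt64.toNat_ofNat']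
  have e4 : (4 : UInt64).toNat = 4 := by decide
  rw [e4]
  omega

/-- `movsxd rax, ebp ; lea rdx, [r14 + rax*4]` (0x10eafa, 0x10eb02, C 2120): `target + offset`, as a number. -/
theorem lea1_toNat (p : Word) (a : Nat) (ha : a < 2 ^ 31) (h : p.toNat + 4 * a < 2 ^ 64) :
    (p + Word.ofBV (BitVec.signExtend 64 (Word.part Width.w32 (UInt64.ofNat a))) * 4).toNat = p.toNat + 4 * a := by
  rw [sext_ofNat a ha, UInt64.toNat_add, UInt64.toNat_mul, UInt64.toNat_ofNat']
  have e4 : (4 : UInt64).toNat = 4 := by decide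
  rw [e4]
  omega

/-- `mov r32, r32` of a register that holds a small number: the number. -/
theorem ofBV_part32_ofNat (a : Nat) (ha : a < 2 ^ 31) : Word.ofBV (Word.part Width.w32 (UInt64.ofNat a)) = UInt64.ofNat a := by
  rw [ofBV_eq_addr _ (by decide), part32_ofNat_toNat a ha]
  rfl

/-- A small number as an unsigned 32-bit argument. -/
theorem argU32_ofNat (a : Nat) (ha : a < 2 ^ 31) : argU32 (UInt64.ofNat a) = a := by
  unfold argU32
  rw [UInt64.toNat_ofNat']
  omega

/-- A small number as an `int` argument. -/
theorem argInt_ofNat (a : Nat) (ha : a < 2 ^ 31) : argInt (UInt64.ofNat a) = (a : Int) := by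
  have h := argU32_ofNat a ha
  unfold argU32 at h
  unfold argInt
  rw [h]
  have hc := sint32_cases a
  omega

/-- `add ebx, 1` / `add ebx, eax` on registers that hold small numbers: the sum. -/
theorem add32_ofNat (k d : Nat) (h : k + d < 2 ^ 31) :
    Word.ofBV (Word.part Width.w32 (UInt64.ofNat k) + BitVec.ofNat 32 d) = UInt64.ofNat (k + d) := by
  apply UInt64.toNat_inj.mp
  rw [Vorbis.toNat_ofBV32, BitVec.toNat_add, part32_ofNat_toNat k (by omega), BitVec.toNat_ofNat, UInt64.toNat_ofNat']
  omega

/-- `mov ecx, r13d ; sub ecx, ebx` (0x10eafd, 0x10eb00, C 2120): `n - k` as an `int` argument, for `k ≤ n`. -/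
theorem argInt_sub32 (a b : Nat) (hb : b ≤ a) (ha : a < 2 ^ 31) :
    argInt (Word.ofBV (Word.part Width.w32 (UInt64.ofNat a) - Word.part Width.w32 (UInt64.ofNat b))) =
      ((a - b : Nat) : Int) := by
  unfold argInt
  rw [Vorbis.toNat_ofBV32, BitVec.toNat_sub, part32_ofNat_toNat a ha, part32_ofNat_toNat b (by omega)]
  have hc := sint32_cases ((2 ^ 32 - b + a) % 2 ^ 32 % 2 ^ 32)
  omega

/-- `len' = min(len, d)` is at most `d`. -/
theorem decodeLen_le_dim {mem : Mem} {c d : Nat} (hdim : Codebook.dimensions mem c = (d : Int)) (l : Int) :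
    decodeLen mem c l ≤ d := by
  unfold decodeLen
  rw [hdim]
  omega

/-- `len' = min(len, d)` is at most `len`. -/
theorem decodeLen_le_len {mem : Mem} {c : Nat} (l : Int) (m : Nat) (hl : l ≤ (m : Int)) : decodeLen mem c l ≤ m := by
  unfold decodeLen
  omega

/-- **The strided call of the loop 2115 stays inside the window** (also when `len' = 0`: an empty footprint). -/
theorem step_fits {mem : Mem} {c d step n k : Nat} (hdim : Codebook.dimensions mem c = (d : Int)) (hd1 : 1 ≤ d)
    (hstepd : step * d ≤ n) (hk : k < step) (l : Int) : 4 * k + stepBytes (decodeLen mem c l) step ≤ 4 * n :=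
  stepBytes_fits hd1 (decodeLen_le_dim hdim l) hstepd hk

/-- **The precondition of codebook_decode_step at 0x10eac6** (C 2116), besides `BookPre`: the product is small, and the coarse
window of the strided call is a part of residue_decode's window of floats. For ANY `len` (it is `n − offset − k`, often `≤ 0`). -/
theorem step_window {others : List Obj} {frames : List (Nat × FrameLayout)} {mem : Mem} {f c t off n k step d : Nat}
    (hw : FloatWindow others frames mem f c (t + 4 * off) (4 * n)) (hdim : Codebook.dimensions mem c = (d : Int))
    (hd1 : 1 ≤ d) (hstepd : step * d ≤ n) (hk : k < step) (hn : n ≤ 8192) (l : Int) (hpos : 0 < decodeLen mem c l) :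
    (decodeLen mem c l - 1) * step < 2 ^ 29 ∧
      FloatWindow others frames mem f c (t + 4 * (off + k)) (stepBytes (decodeLen mem c l) step) := by
  have hl := decodeLen_le_dim hdim l
  have hfit := step_fits hdim hd1 hstepd hk l
  refine ⟨step_product_lt hl hstepd hn, hw.sub (by omega) (by omega) ?_⟩
  unfold stepBytes
  split <;> omega

/-- **The precondition of codebook_decode at 0x10eb0e** (C 2120), besides `BookPre`: the `min(n − k, d)` floats at
`target + offset + k` are a part of residue_decode's window of floats. -/
theorem dec_window {others : List Obj} {frames : List (Nat × FrameLayout)} {mem : Mem} {f c t off n k : Nat}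
    (hw : FloatWindow others frames mem f c (t + 4 * off) (4 * n)) (l : Int) (hl : l ≤ ((n - k : Nat) : Int))
    (hk : k < n) (hpos : 0 < decodeLen mem c l) :
    FloatWindow others frames mem f c (t + 4 * (off + k)) (4 * decodeLen mem c l) := by
  have h1 := decodeLen_le_len (mem := mem) (c := c) l (n - k) hl
  exact hw.sub (by omega) (by omega) (by omega)

/-- **residue_decode's footprint through a callee's** (codebook_decode_step, codebook_decode: 512 bytes of stack below `sp'`, the
reader's windows of `*f`, a window of floats `[a, a + X)` inside ours). In a clean context: `u_same` on the walk's context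
takes minutes (seven windows against the disjunctive where-facts). -/
theorem same_through {m0 m1 m2 : Mem} {sp f W n sp' a X : Nat}
    (h : Mem.SameExcept [⟨sp - 592, sp⟩, ⟨f + 48, f + 56⟩, ⟨f + 84, f + 96⟩, ⟨f + 136, f + 144⟩, ⟨f + 1484, f + 1749⟩,
      ⟨f + 1752, f + 1784⟩, ⟨W, W + 4 * n⟩] m0 m1)
    (hs : Mem.SameExcept [⟨sp' - 512, sp'⟩, ⟨f + 48, f + 56⟩, ⟨f + 84, f + 96⟩, ⟨f + 136, f + 144⟩,
      ⟨f + 1484, f + 1749⟩, ⟨f + 1752, f + 1784⟩, ⟨a, a + X⟩] m1 m2)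
    (h1 : sp - 592 ≤ sp' - 512) (h2 : sp' ≤ sp) (h3 : W ≤ a) (h4 : a + X ≤ W + 4 * n) :
    Mem.SameExcept [⟨sp - 592, sp⟩, ⟨f + 48, f + 56⟩, ⟨f + 84, f + 96⟩, ⟨f + 136, f + 144⟩, ⟨f + 1484, f + 1749⟩,
      ⟨f + 1752, f + 1784⟩, ⟨W, W + 4 * n⟩] m0 m2 := by
  apply Reader.sameExcept_through_callee h hs
  intro w hw
  simp only [List.mem_cons, List.not_mem_nil, or_false] at hw
  simp only [X86.User.inSpans_cons, X86.User.inSpans_nil, or_false]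
  rcases hw with rfl | rfl | rfl | rfl | rfl | rfl | rfl
  · exact Or.inl ⟨by simp only []; omega, by simp only []; omega⟩
  · exact Or.inr (Or.inl ⟨by simp only []; omega, by simp only []; omega⟩)
  · exact Or.inr (Or.inr (Or.inl ⟨by simp only []; omega, by simp only []; omega⟩))
  · exact Or.inr (Or.inr (Or.inr (Or.inl ⟨by simp only []; omega, by simp only []; omega⟩)))
  · exact Or.inr (Or.inr (Or.inr (Or.inr (Or.inl ⟨by simp only []; omega, by simp only []; omega⟩))))
  · exact Or.inr (Or.inr (Or.inr (Or.inr (Or.inr (Or.inl ⟨by simp only []; omega, by simp only []; omega⟩)))))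
  · exact Or.inr (Or.inr (Or.inr (Or.inr (Or.inr (Or.inr ⟨by simp only []; omega, by simp only []; omega⟩)))))

/-- **A stack slot of residue_decode's frame through a callee's footprint**: the slot lies at or above the callee's entry stack
pointer `sp'` and below `top`; `*f` and the callee's window of floats are off `[sp' - 512, top)`. -/
theorem slot_through {m1 m2 : Mem} {f sp' a X top : Nat} {a0 x : Word} {k : Nat}
    (hs : Mem.SameExcept [⟨sp' - 512, sp'⟩, ⟨f + 48, f + 56⟩, ⟨f + 84, f + 96⟩, ⟨f + 136, f + 144⟩,
      ⟨f + 1484, f + 1749⟩, ⟨f + 1752, f + 1784⟩, ⟨a, a + X⟩] m1 m2)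
    (h : UInt64.ofNat (m1.readLE a0 k) = x) (hlo : sp' ≤ a0.toNat) (hhi : a0.toNat + k ≤ top) (htop : top < 2 ^ 64)
    (hf : top ≤ f ∨ f + 1808 ≤ sp') (hW : top ≤ a ∨ a + X ≤ sp') :
    UInt64.ofNat (m2.readLE a0 k) = x := by
  refine Mem.ofNat_readLE_frame h (hs.eqOn _ _ ?_) (by omega)
  intro w hw
  simp only [List.mem_cons, List.not_mem_nil, or_false] at hw
  rcases hw with rfl | rfl | rfl | rfl | rfl | rfl | rfl
  all_goals
    simp only []
    omega

/-- **`book->dimensions` reads the same after residue_decode's stores and its callees'**: no window of the footprint meets the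
struct at `book`. -/
theorem read_through {m0 m1 : Mem} {sp f W n c x : Nat} {a0 : Word}
    (h : Mem.SameExcept [⟨sp - 592, sp⟩, ⟨f + 48, f + 56⟩, ⟨f + 84, f + 96⟩, ⟨f + 136, f + 144⟩, ⟨f + 1484, f + 1749⟩,
      ⟨f + 1752, f + 1784⟩, ⟨W, W + 4 * n⟩] m0 m1)
    (hr : m0.readLE a0 4 = x) (ha : a0.toNat = c) (hc : c + 2120 < 2 ^ 64)
    (hcS : sp ≤ c ∨ c + 2120 ≤ sp - 592) (hfb : c + 2120 ≤ f ∨ f + 1808 ≤ c) (hwb : W + 4 * n ≤ c ∨ c + 2120 ≤ W) :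
    m1.readLE a0 4 = x := by
  refine Mem.readLE_frame hr (h.eqOn _ _ ?_) (by omega)
  intro w hw
  simp only [List.mem_cons, List.not_mem_nil, or_false] at hw
  rcases hw with rfl | rfl | rfl | rfl | rfl | rfl | rfl
  all_goals
    simp only []
    omega

/-- One more store below the shadow region (the return address of a check call) writes no shadow byte. -/
theorem untouched_store {m0 m1 : Mem} (h : ShadowUntouched m0 m1) (w : Word) (k v : Nat) (hw : w.toNat + k ≤ 0xC00000) :
    ShadowUntouched m0 (m1.writeLE w k v) := by
  unfold ShadowUntouched at h ⊢
  exact Mem.EqOn.trans h (Mem.eqOn_writeLE m1 w k v 0xC00000 0x200000 (by omega) (Or.inr hw))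

end Vorbis.Spec.residue_decode
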